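-- pv_equiv track=rewrite | github.com/volcengine/verl | atropos/environments/intern_bootcamp/internbootcamp_lib/internbootcamp/bootcamp/bminimization/bminimization.py | compute_min_sum
-- ===== SOURCE A (Python) =====
-- def compute_min_sum(n, k, A):
--     numbers = sorted(A)
--     if n == 0:
--         return 0
--     if k == 0:
--         return numbers[-1] - numbers[0]
--
--     adding_one = n % k
--     part_length = n // k
--     total_groups = k + 1
--
--     # 构建差分数组（注意索引偏移）
--     diff = []
--     for i in range(n-1):
--         diff.append(numbers[i+1] - numbers[i])
--
--     # 动态规划初始化
--     dp = [[0]*(k+1) for _ in range(adding_one+1)]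
--
--     # 预处理第一个分割点
--     for e in range(1, k+1):
--         pos = (e-1)*part_length
--         if pos >= len(diff):
--             val = 0
--         else:
--             val = diff[pos]
--         dp[0][e] = dp[0][e-1] + val
--
--     # 处理添加额外元素的分割
--     for a in range(1, adding_one+1):
--         for e in range(1, k+1):
--             if e < a: continue
--             pos = (e-1)*part_length + a
--             if pos >= len(diff):
--                 val = 0
--             else:
--                 val = diff[pos]
--
--             if a == e:
--                 dp[a][e] = dp[a-1][e-1] + val
--             else:
--                 dp[a][e] = max(dp[a-1][e-1], dp[a][e-1]) + val
--
--     max_sum_diff = dp[adding_one][k]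
--     total_range = numbers[-1] - numbers[0]
--     return total_range - max_sum_diff
-- ===== SOURCE B (Python) =====
-- def compute_min_sum(n, k, A):
--     numbers = sorted(A)
--     if n == 0:
--         return 0
--     if k == 0:
--         return numbers[-1] - numbers[0]
--
--     adding_one = n % k
--     part_length = n // k
--     diff = [numbers[i + 1] - numbers[i] for i in range(n - 1)]
--
--     memo = {}
--
--     def best(a, e):
--         # value of A's dp cell (a, e), computed on demand
--         if e == 0:
--             return 0
--         if (a, e) in memo:
--             return memo[(a, e)]
--         pos = (e - 1) * part_length + a
--         val = diff[pos] if pos < len(diff) else 0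
--         if a == 0:
--             r = best(0, e - 1) + val
--         elif e < a:
--             r = 0
--         elif a == e:
--             r = best(a - 1, e - 1) + val
--         else:
--             r = max(best(a - 1, e - 1), best(a, e - 1)) + val
--         memo[(a, e)] = r
--         return r
--
--     return (numbers[-1] - numbers[0]) - best(adding_one, k)
-- ===== Notes on version B (the rewrite author's own statement) =====
-- stated objective: alternative
-- what changed: A fills a whole 2D dp table bottom-up with two nested loops plus a separate base-row loop; B replaces the table entirely by a top-down memoized recursive helper best(a, e) that computes only the cells actually reachable from (adding_one, k), with the base row, the e<a cut-off and the a==e diagonal as recursion cases.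
import Mathlib
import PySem

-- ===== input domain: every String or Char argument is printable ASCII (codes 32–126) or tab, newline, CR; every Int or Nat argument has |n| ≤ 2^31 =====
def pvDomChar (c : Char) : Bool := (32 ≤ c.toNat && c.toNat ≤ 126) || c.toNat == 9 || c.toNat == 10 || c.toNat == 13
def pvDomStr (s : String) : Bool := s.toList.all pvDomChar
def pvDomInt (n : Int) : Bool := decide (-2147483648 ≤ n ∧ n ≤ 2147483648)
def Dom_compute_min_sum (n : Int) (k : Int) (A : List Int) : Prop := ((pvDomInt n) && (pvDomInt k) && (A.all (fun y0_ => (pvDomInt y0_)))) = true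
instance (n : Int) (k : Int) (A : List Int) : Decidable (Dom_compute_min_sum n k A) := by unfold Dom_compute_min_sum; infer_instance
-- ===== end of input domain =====

-- B replaces A's bottom-up 2D dp table by a top-down memoized recursive helper best(a, e)
-- that computes only the reachable cells (objective: alternative decomposition).

-- ===== PORT A =====
-- dp[a][e] = v / dp[a][e] reads are transliterated with list-of-lists updates (exact on
-- Pre_, where every Python index written or read is in range).
def pvGet2 (dp : List (List Int)) (a e : Int) : Int :=
  (PySem.List.pyGet? ((PySem.List.pyGet? dp a).getD []) e).getD 0

def pvSet2 (dp : List (List Int)) (a e : Int) (v : Int) : List (List Int) :=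
  dp.set a.toNat ((dp.getD a.toNat []).set e.toNat v)

def compute_min_sum (n : Int) (k : Int) (A : List Int) : Int :=
  let numbers := PySem.List.sorted A (fun x => x) false
  if n = 0 then 0
  else if k = 0 then (PySem.List.pyGet? numbers (-1)).getD 0 - (PySem.List.pyGet? numbers 0).getD 0
  else
    let adding_one := PySem.Int.mod n k
    let part_length := PySem.Int.floordiv n k
    let diff := (PySem.List.pyRange 0 (n-1) 1).foldl
      (fun d i => d ++ [(PySem.List.pyGet? numbers (i+1)).getD 0 - (PySem.List.pyGet? numbers i).getD 0]) []
    let dp0 : List (List Int) := List.replicate (adding_one+1).toNat (List.replicate (k+1).toNat 0)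
    let dp1 := (PySem.List.pyRange 1 (k+1) 1).foldl (fun dp e =>
      let pos := (e-1)*part_length
      let val := if (diff.length : Int) ≤ pos then 0 else (PySem.List.pyGet? diff pos).getD 0
      pvSet2 dp 0 e (pvGet2 dp 0 (e-1) + val)) dp0
    let dp2 := (PySem.List.pyRange 1 (adding_one+1) 1).foldl (fun dp a =>
      (PySem.List.pyRange 1 (k+1) 1).foldl (fun dp e =>
        if e < a then dp
        else
          let pos := (e-1)*part_length + a
          let val := if (diff.length : Int) ≤ pos then 0 else (PySem.List.pyGet? diff pos).getD 0
          if a = e then pvSet2 dp a e (pvGet2 dp (a-1) (e-1) + val)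
          else pvSet2 dp a e (max (pvGet2 dp (a-1) (e-1)) (pvGet2 dp a (e-1)) + val)) dp) dp1
    let max_sum_diff := pvGet2 dp2 adding_one k
    let total_range := (PySem.List.pyGet? numbers (-1)).getD 0 - (PySem.List.pyGet? numbers 0).getD 0
    total_range - max_sum_diff

-- ===== PORT B =====
-- B's inline val expression: diff[pos] when pos < len(diff), else 0 (pos never negative on Pre_).
def pvVal (diff : List Int) (pl : Int) (a e : Int) : Int :=
  let pos := (e-1)*pl + a
  if pos < (diff.length : Int) then (PySem.List.pyGet? diff pos).getD 0 else 0

-- B's memoized helper best(a, e): the memo dict is threaded through explicitly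
-- (e is the structural recursion argument; Python's `if e == 0` base case is the 0 pattern).
def pvBestM (diff : List Int) (pl : Int) :
    PySem.Dict (Int × Int) Int → Int → Nat → Int × PySem.Dict (Int × Int) Int
  | memo, _, 0 => (0, memo)
  | memo, a, e+1 =>
    match memo.get? (a, (e:Int)+1) with
    | some r => (r, memo)
    | none =>
      let val := pvVal diff pl a ((e:Int)+1)
      let (r, m2) :=
        if a = 0 then
          let (r0, m1) := pvBestM diff pl memo 0 e
          (r0 + val, m1)
        else if (e:Int)+1 < a then (0, memo)
        else if a = (e:Int)+1 then
          let (r1, m1) := pvBestM diff pl memo (a-1) e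
          (r1 + val, m1)
        else
          let (r1, m1) := pvBestM diff pl memo (a-1) e
          let (r2, m1') := pvBestM diff pl m1 a e
          (max r1 r2 + val, m1')
      (r, m2.insert (a, (e:Int)+1) r)

def compute_min_sum_alt (n : Int) (k : Int) (A : List Int) : Int :=
  let numbers := PySem.List.sorted A (fun x => x) false
  if n = 0 then 0
  else if k = 0 then (PySem.List.pyGet? numbers (-1)).getD 0 - (PySem.List.pyGet? numbers 0).getD 0
  else
    let adding_one := PySem.Int.mod n k
    let part_length := PySem.Int.floordiv n k
    let diff := (PySem.List.pyRange 0 (n-1) 1).map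
      (fun i => (PySem.List.pyGet? numbers (i+1)).getD 0 - (PySem.List.pyGet? numbers i).getD 0)
    ((PySem.List.pyGet? numbers (-1)).getD 0 - (PySem.List.pyGet? numbers 0).getD 0)
      - (pvBestM diff part_length PySem.Dict.empty adding_one k.toNat).1

-- ===== PRECONDITION & SPEC =====
-- Pre_ = exactly the inputs on which the Python A returns normally: n = 0 (returns 0);
-- k = 0 with n ≠ 0 needs a nonempty list; k ≥ 1 needs 1 ≤ n ≤ len(A) (else the diff loop
-- or an empty dp row raises IndexError), except that n ≤ -1 with k = 1 also returns.
def Pre_compute_min_sum (n : Int) (k : Int) (A : List Int) : Prop :=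
  n = 0 ∨ (n ≠ 0 ∧ k = 0 ∧ A ≠ []) ∨ (1 ≤ n ∧ n ≤ (A.length : Int) ∧ 1 ≤ k) ∨ (n ≤ -1 ∧ k = 1 ∧ A ≠ [])
instance (n : Int) (k : Int) (A : List Int) : Decidable (Pre_compute_min_sum n k A) := by
  unfold Pre_compute_min_sum; infer_instance

def pvWitness_compute_min_sum : Int × Int × List Int := (5, 2, [3, 1, 4, 1, 5])

def Spec_compute_min_sum (n : Int) (k : Int) (A : List Int) (out : Int) : Prop := out = compute_min_sum_alt n k A
instance (n : Int) (k : Int) (A : List Int) (out : Int) : Decidable (Spec_compute_min_sum n k A out) := by unfold Spec_compute_min_sum; infer_instance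

-- ===== CLAIM (what is proved, stated in full; the proofs are below) =====
def Claim_equal_compute_min_sum : Prop := ∀ (n : Int) (k : Int) (A : List Int), Dom_compute_min_sum n k A → Pre_compute_min_sum n k A → Spec_compute_min_sum n k A (compute_min_sum n k A)

-- ===== LEMMAS AND PROOFS =====

-- reference value of dp[a][e]
def pvBest (v : Nat → Nat → Int) : Nat → Nat → Int
  | _, 0 => 0
  | a, e+1 =>
    if a = 0 then pvBest v 0 e + v 0 (e+1)
    else if e+1 < a then 0
    else if a = e+1 then pvBest v (a-1) e + v a (e+1)
    else max (pvBest v (a-1) e) (pvBest v a e) + v a (e+1)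

def pvV (diff : List Int) (pl : Int) (a e : Nat) : Int := pvVal diff pl (a : Int) (e : Int)

-- the A-side inline val expression agrees with B's val expression (the two ifs are complements)
theorem pvHVal (diff : List Int) (pl : Int) (a e : Int) :
    (if (diff.length : Int) ≤ (e-1)*pl + a then 0 else (PySem.List.pyGet? diff ((e-1)*pl + a)).getD 0)
      = pvVal diff pl a e := by
  simp only [pvVal]
  by_cases h : (e-1)*pl + a < (diff.length : Int)
  · rw [if_neg (by omega), if_pos h]
  · rw [if_pos (by omega), if_neg h]

theorem pvBest_zero (v : Nat → Nat → Int) (a : Nat) : pvBest v a 0 = 0 := rfl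

theorem pvBest_of_lt (v : Nat → Nat → Int) (a e : Nat) (h : e < a) : pvBest v a e = 0 := by
  cases e with
  | zero => rfl
  | succ e => simp only [pvBest]; rw [if_neg (by omega), if_pos (by omega)]

-- ===== A-side: the double loop fills the table with pvBest values =====

-- reference table contents: rows < i complete, row i filled up to column m
def pvTabF (diff : List Int) (pl : Int) (i m : Nat) (a e : Nat) : Int :=
  if a < i ∨ (a = i ∧ 1 ≤ e ∧ e ≤ m) then pvBest (pvV diff pl) a e else 0

def pvTab (diff : List Int) (pl : Int) (K AO i m : Nat) : List (List Int) :=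
  (List.range (AO+1)).map (fun a => (List.range (K+1)).map (fun e => pvTabF diff pl i m a e))

theorem pv_set_map_range {β : Type} (n : Nat) (f : Nat → β) (t : Nat) (x : β) (ht : t < n) :
    ((List.range n).map f).set t x = (List.range n).map (fun s => if s = t then x else f s) := by
  apply List.ext_getElem
  · simp
  · intro i h1 h2
    simp only [List.getElem_set, List.getElem_map, List.getElem_range]
    split_ifs <;> first | rfl | omega

theorem pv_tab_congr (K AO : Nat) (g h : Nat → Nat → Int)
    (H : ∀ a e, a ≤ AO → e ≤ K → g a e = h a e) :
    (List.range (AO+1)).map (fun a => (List.range (K+1)).map (g a))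
      = (List.range (AO+1)).map (fun a => (List.range (K+1)).map (h a)) := by
  apply List.map_congr_left
  intro a ha
  apply List.map_congr_left
  intro e he
  exact H a e (by have := List.mem_range.mp ha; omega) (by have := List.mem_range.mp he; omega)

theorem pv_get2_tab (g : Nat → Nat → Int) (K AO : Nat) (I J : Int)
    (hI0 : 0 ≤ I) (hJ0 : 0 ≤ J) (hI : I.toNat ≤ AO) (hJ : J.toNat ≤ K) :
    pvGet2 ((List.range (AO+1)).map (fun a => (List.range (K+1)).map (g a))) I J
      = g I.toNat J.toNat := by
  unfold pvGet2
  rw [PySem.List.pyGet?_of_nonneg _ hI0, List.getElem?_map, List.getElem?_range (by omega)]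
  simp only [Option.map_some, Option.getD_some]
  rw [PySem.List.pyGet?_of_nonneg _ hJ0, List.getElem?_map, List.getElem?_range (by omega)]
  simp

theorem pv_set2_tab (g : Nat → Nat → Int) (K AO : Nat) (I J : Int) (v : Int)
    (hI0 : 0 ≤ I) (hJ0 : 0 ≤ J) (hI : I.toNat ≤ AO) (hJ : J.toNat ≤ K) :
    pvSet2 ((List.range (AO+1)).map (fun a => (List.range (K+1)).map (g a))) I J v
    = (List.range (AO+1)).map (fun a => (List.range (K+1)).map (fun e =>
        if a = I.toNat ∧ e = J.toNat then v else g a e)) := by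
  unfold pvSet2
  rw [List.getD_eq_getElem?_getD, List.getElem?_map, List.getElem?_range (by omega)]
  simp only [Option.map_some, Option.getD_some]
  rw [pv_set_map_range _ _ _ _ (show J.toNat < K+1 by omega),
    pv_set_map_range _ _ _ _ (show I.toNat < AO+1 by omega)]
  apply List.map_congr_left
  intro a ha
  by_cases haI : a = I.toNat
  · subst haI
    rw [if_pos rfl]
    apply List.map_congr_left
    intro e he
    by_cases heJ : e = J.toNat
    · rw [if_pos heJ, if_pos ⟨rfl, heJ⟩]
    · rw [if_neg heJ, if_neg (by tauto)]
  · rw [if_neg haI]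
    apply List.map_congr_left
    intro e he
    rw [if_neg (by tauto)]

theorem pv_tab_init (diff : List Int) (pl : Int) (K AO : Nat) :
    List.replicate (AO+1) (List.replicate (K+1) (0:Int)) = pvTab diff pl K AO 0 0 := by
  symm
  unfold pvTab
  rw [pv_tab_congr K AO _ (fun _ _ => (0:Int))
    (fun a e _ _ => by unfold pvTabF; rw [if_neg (by omega)])]
  simp [List.map_const']

-- A's base-row loop
theorem pv_row0 (diff : List Int) (pl : Int) (K AO : Nat)
    (m : Nat) (hm : m ≤ K) :
    ((PySem.List.pyRange 1 ((m:Int)+1) 1).foldl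
      (fun dp e => pvSet2 dp 0 e (pvGet2 dp 0 (e-1) +
        (if (diff.length : Int) ≤ (e-1)*pl then 0 else (PySem.List.pyGet? diff ((e-1)*pl)).getD 0)))
      (pvTab diff pl K AO 0 0))
    = pvTab diff pl K AO 0 m := by
  induction m with
  | zero =>
    rw [PySem.List.pyRange_one_eq_nil (show (((0:Nat):Int)+1) ≤ (1:Int) from by omega)]
    rfl
  | succ m ih =>
    have hmK : m ≤ K := by omega
    have hsplit : PySem.List.pyRange 1 ((((m+1):Nat):Int)+1) 1
        = PySem.List.pyRange 1 ((m:Int)+1) 1 ++ [(m:Int)+1] := by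
      push_cast
      exact PySem.List.pyRange_one_succ_right (by omega)
    rw [hsplit, List.foldl_append, ih hmK]
    simp only [List.foldl_cons, List.foldl_nil]
    rw [show ((m:Int)+1-1 : Int) = (m:Int) from by ring]
    unfold pvTab
    rw [pv_get2_tab (pvTabF diff pl 0 m) K AO 0 ((m:Int)) (by omega) (by omega) (by omega) (by omega),
      pv_set2_tab (pvTabF diff pl 0 m) K AO 0 ((m:Int)+1) _ (by omega) (by omega) (by omega) (by omega)]
    have hr : pvTabF diff pl 0 m ((0:Int)).toNat ((m:Int)).toNat = pvBest (pvV diff pl) 0 m := by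
      rw [show ((0:Int)).toNat = 0 from rfl, show ((m:Int)).toNat = m from by omega]
      unfold pvTabF
      by_cases h1 : 1 ≤ m
      · rw [if_pos (by omega)]
      · have h0 : m = 0 := by omega
        subst h0
        rw [if_neg (by omega), pvBest_zero]
    have hv : (if (diff.length : Int) ≤ ((m:Int))*pl then 0
        else (PySem.List.pyGet? diff (((m:Int))*pl)).getD 0) = pvV diff pl 0 (m+1) := by
      have h := pvHVal diff pl 0 ((m:Int)+1)
      rw [show ((m:Int)+1-1 : Int) = (m:Int) from by ring, add_zero] at h
      rw [h]
      simp only [pvV]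
      norm_cast
    rw [hr, hv]
    apply pv_tab_congr
    intro a e ha he
    rw [show ((0:Int)).toNat = 0 from rfl, show ((m:Int)+1).toNat = m+1 from by omega]
    by_cases hc : a = 0 ∧ e = m+1
    · obtain ⟨ha0, he1⟩ := hc
      subst ha0; subst he1
      rw [if_pos ⟨rfl, rfl⟩]
      unfold pvTabF
      rw [if_pos (by omega)]
      simp [pvBest]
    · rw [if_neg hc]
      unfold pvTabF
      split_ifs <;> first | rfl | omega

-- one pass of A's a-th row loop (I is the Int value of the loop variable a)
theorem pv_rowpass (diff : List Int) (pl : Int) (K AO i : Nat) (I : Int)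
    (hi : 1 ≤ i) (hI : I = (i:Int)) (hiAO : i ≤ AO) (m : Nat) (hm : m ≤ K) :
    ((PySem.List.pyRange 1 ((m:Int)+1) 1).foldl
      (fun dp e =>
        if e < I then dp
        else
          if I = e then pvSet2 dp I e (pvGet2 dp (I-1) (e-1) +
            (if (diff.length : Int) ≤ (e-1)*pl + I then 0 else (PySem.List.pyGet? diff ((e-1)*pl + I)).getD 0))
          else pvSet2 dp I e (max (pvGet2 dp (I-1) (e-1)) (pvGet2 dp I (e-1)) +
            (if (diff.length : Int) ≤ (e-1)*pl + I then 0 else (PySem.List.pyGet? diff ((e-1)*pl + I)).getD 0)))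
      (pvTab diff pl K AO i 0))
    = pvTab diff pl K AO i m := by
  subst hI
  induction m with
  | zero =>
    rw [PySem.List.pyRange_one_eq_nil (show (((0:Nat):Int)+1) ≤ (1:Int) from by omega)]
    rfl
  | succ m ih =>
    have hmK : m ≤ K := by omega
    have hsplit : PySem.List.pyRange 1 ((((m+1):Nat):Int)+1) 1
        = PySem.List.pyRange 1 ((m:Int)+1) 1 ++ [(m:Int)+1] := by
      push_cast
      exact PySem.List.pyRange_one_succ_right (by omega)
    rw [hsplit, List.foldl_append, ih hmK]
    simp only [List.foldl_cons, List.foldl_nil]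
    by_cases hlt : ((m:Int)+1 < (i:Int))
    · rw [if_pos hlt]
      unfold pvTab
      apply pv_tab_congr
      intro a e ha he
      unfold pvTabF
      by_cases hc : a < i ∨ (a = i ∧ 1 ≤ e ∧ e ≤ m)
      · rw [if_pos hc, if_pos (by omega)]
      · rw [if_neg hc]
        by_cases hc2 : a < i ∨ (a = i ∧ 1 ≤ e ∧ e ≤ m+1)
        · rw [if_pos hc2]
          have hae : a = i ∧ e = m+1 := by omega
          obtain ⟨h1, h2⟩ := hae
          subst h1; subst h2
          rw [pvBest_of_lt _ _ _ (by omega)]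
        · rw [if_neg hc2]
    · rw [if_neg hlt]
      rw [show ((m:Int)+1-1 : Int) = (m:Int) from by ring]
      unfold pvTab
      rw [pv_get2_tab (pvTabF diff pl i m) K AO ((i:Int)-1) ((m:Int)) (by omega) (by omega) (by omega) (by omega)]
      have hr1 : pvTabF diff pl i m ((i:Int)-1).toNat ((m:Int)).toNat = pvBest (pvV diff pl) (i-1) m := by
        rw [show ((i:Int)-1).toNat = i-1 from by omega, show ((m:Int)).toNat = m from by omega]
        unfold pvTabF
        rw [if_pos (by omega)]
      have hv : (if (diff.length : Int) ≤ ((m:Int))*pl + (i:Int) then 0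
          else (PySem.List.pyGet? diff (((m:Int))*pl + (i:Int))).getD 0) = pvV diff pl i (m+1) := by
        have h := pvHVal diff pl (i:Int) ((m:Int)+1)
        rw [show ((m:Int)+1-1 : Int) = (m:Int) from by ring] at h
        rw [h]
        simp only [pvV]
        norm_cast
      by_cases hde : ((i:Int)) = (m:Int)+1
      · rw [if_pos hde,
          pv_set2_tab (pvTabF diff pl i m) K AO ((i:Int)) ((m:Int)+1) _ (by omega) (by omega) (by omega) (by omega)]
        rw [hr1, hv]
        have hB : pvBest (pvV diff pl) i (m+1)
            = pvBest (pvV diff pl) (i-1) m + pvV diff pl i (m+1) := by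
          simp only [pvBest]
          rw [if_neg (by omega), if_neg (by omega), if_pos (by omega)]
        apply pv_tab_congr
        intro a e ha he
        rw [show ((i:Int)).toNat = i from by omega, show ((m:Int)+1).toNat = m+1 from by omega]
        by_cases hc : a = i ∧ e = m+1
        · obtain ⟨h1, h2⟩ := hc
          subst h1; subst h2
          rw [if_pos ⟨rfl, rfl⟩]
          unfold pvTabF
          rw [if_pos (by omega), hB]
        · rw [if_neg hc]
          unfold pvTabF
          split_ifs <;> first | rfl | omega
      · rw [if_neg hde,
          pv_set2_tab (pvTabF diff pl i m) K AO ((i:Int)) ((m:Int)+1) _ (by omega) (by omega) (by omega) (by omega)]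
        rw [pv_get2_tab (pvTabF diff pl i m) K AO ((i:Int)) ((m:Int)) (by omega) (by omega) (by omega) (by omega)]
        have hr2 : pvTabF diff pl i m ((i:Int)).toNat ((m:Int)).toNat = pvBest (pvV diff pl) i m := by
          rw [show ((i:Int)).toNat = i from by omega, show ((m:Int)).toNat = m from by omega]
          unfold pvTabF
          by_cases h1 : 1 ≤ m
          · rw [if_pos (by omega)]
          · have h0 : m = 0 := by omega
            subst h0
            rw [if_neg (by omega), pvBest_zero]
        rw [hr1, hr2, hv]
        have hB : pvBest (pvV diff pl) i (m+1)
            = max (pvBest (pvV diff pl) (i-1) m) (pvBest (pvV diff pl) i m) + pvV diff pl i (m+1) := by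
          simp only [pvBest]
          rw [if_neg (by omega), if_neg (by omega), if_neg (by omega)]
        apply pv_tab_congr
        intro a e ha he
        rw [show ((i:Int)).toNat = i from by omega, show ((m:Int)+1).toNat = m+1 from by omega]
        by_cases hc : a = i ∧ e = m+1
        · obtain ⟨h1, h2⟩ := hc
          subst h1; subst h2
          rw [if_pos ⟨rfl, rfl⟩]
          unfold pvTabF
          rw [if_pos (by omega), hB]
        · rw [if_neg hc]
          unfold pvTabF
          split_ifs <;> first | rfl | omega

-- a finished row re-read as the start state of the next row
theorem pv_bridge (diff : List Int) (pl : Int) (K AO i : Nat) (hi : 1 ≤ i) :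
    pvTab diff pl K AO (i-1) K = pvTab diff pl K AO i 0 := by
  unfold pvTab
  apply pv_tab_congr
  intro a e ha he
  unfold pvTabF
  by_cases hL : a < i-1 ∨ (a = i-1 ∧ 1 ≤ e ∧ e ≤ K)
  · rw [if_pos hL, if_pos (by omega)]
  · rw [if_neg hL]
    by_cases hR : a < i ∨ (a = i ∧ 1 ≤ e ∧ e ≤ 0)
    · rw [if_pos hR]
      have he0 : e = 0 := by omega
      subst he0
      rw [pvBest_zero]
    · rw [if_neg hR]

-- A's whole double loop fills the table row by row
theorem pv_allrows (diff : List Int) (pl : Int) (K AO : Nat)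
    (j : Nat) (hj : j ≤ AO) :
    ((PySem.List.pyRange 1 ((j:Int)+1) 1).foldl
      (fun dp a => (PySem.List.pyRange 1 ((K:Int)+1) 1).foldl
        (fun dp e =>
          if e < a then dp
          else
            if a = e then pvSet2 dp a e (pvGet2 dp (a-1) (e-1) +
              (if (diff.length : Int) ≤ (e-1)*pl + a then 0 else (PySem.List.pyGet? diff ((e-1)*pl + a)).getD 0))
            else pvSet2 dp a e (max (pvGet2 dp (a-1) (e-1)) (pvGet2 dp a (e-1)) +
              (if (diff.length : Int) ≤ (e-1)*pl + a then 0 else (PySem.List.pyGet? diff ((e-1)*pl + a)).getD 0)))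
        dp)
      (pvTab diff pl K AO 0 K))
    = pvTab diff pl K AO j K := by
  induction j with
  | zero =>
    rw [PySem.List.pyRange_one_eq_nil (show (((0:Nat):Int)+1) ≤ (1:Int) from by omega)]
    rfl
  | succ j ih =>
    have hsplit : PySem.List.pyRange 1 ((((j+1):Nat):Int)+1) 1
        = PySem.List.pyRange 1 ((j:Int)+1) 1 ++ [(j:Int)+1] := by
      push_cast
      exact PySem.List.pyRange_one_succ_right (by omega)
    rw [hsplit, List.foldl_append, ih (by omega)]
    simp only [List.foldl_cons, List.foldl_nil]
    have hb := pv_bridge diff pl K AO (j+1) (by omega)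
    simp only [Nat.add_sub_cancel] at hb
    rw [hb]
    have hr := pv_rowpass diff pl K AO (j+1) ((j:Int)+1) (by omega) (by push_cast; ring) (by omega) K le_rfl
    exact hr

-- A's dp read at (AO, K) is pvBest
theorem pv_body_A (diff : List Int) (pl : Int) (K AO : Nat) (hK : 1 ≤ K) :
    pvGet2
      ((PySem.List.pyRange 1 ((AO:Int)+1) 1).foldl
        (fun dp a => (PySem.List.pyRange 1 ((K:Int)+1) 1).foldl
          (fun dp e =>
            if e < a then dp
            else
              if a = e then pvSet2 dp a e (pvGet2 dp (a-1) (e-1) +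
                (if (diff.length : Int) ≤ (e-1)*pl + a then 0 else (PySem.List.pyGet? diff ((e-1)*pl + a)).getD 0))
              else pvSet2 dp a e (max (pvGet2 dp (a-1) (e-1)) (pvGet2 dp a (e-1)) +
                (if (diff.length : Int) ≤ (e-1)*pl + a then 0 else (PySem.List.pyGet? diff ((e-1)*pl + a)).getD 0)))
          dp)
        ((PySem.List.pyRange 1 ((K:Int)+1) 1).foldl
          (fun dp e => pvSet2 dp 0 e (pvGet2 dp 0 (e-1) +
            (if (diff.length : Int) ≤ (e-1)*pl then 0 else (PySem.List.pyGet? diff ((e-1)*pl)).getD 0)))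
          (List.replicate (AO+1) (List.replicate (K+1) 0))))
      ((AO:Int)) ((K:Int))
    = pvBest (pvV diff pl) AO K := by
  rw [pv_tab_init diff pl K AO, pv_row0 diff pl K AO K le_rfl,
    pv_allrows diff pl K AO AO le_rfl]
  unfold pvTab
  rw [pv_get2_tab (pvTabF diff pl AO K) K AO ((AO:Int)) ((K:Int)) (by omega) (by omega) (by omega) (by omega)]
  rw [show ((AO:Int)).toNat = AO from by omega, show ((K:Int)).toNat = K from by omega]
  unfold pvTabF
  rw [if_pos (by omega)]

-- diff is the same list in both ports (append-loop vs comprehension)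
theorem pv_diff_eq (numbers : List Int) (b : Int) :
    (PySem.List.pyRange 0 b 1).foldl
      (fun d i => d ++ [(PySem.List.pyGet? numbers (i+1)).getD 0 - (PySem.List.pyGet? numbers i).getD 0]) []
    = (PySem.List.pyRange 0 b 1).map
      (fun i => (PySem.List.pyGet? numbers (i+1)).getD 0 - (PySem.List.pyGet? numbers i).getD 0) := by
  rw [PySem.List.foldl_append_singleton_eq_map _ _ []]
  rfl

-- ===== B-side: the memoized recursion computes pvBest =====

-- memo invariant: every stored value (at a nonnegative key) is the corresponding pvBest value
def pvInv (diff : List Int) (pl : Int) (memo : PySem.Dict (Int × Int) Int) : Prop :=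
  ∀ (a e r : Int), memo.get? (a, e) = some r → 0 ≤ a → 0 ≤ e →
    r = pvBest (pvV diff pl) a.toNat e.toNat

theorem pvInv_empty (diff : List Int) (pl : Int) : pvInv diff pl PySem.Dict.empty := by
  intro a e r h
  rw [PySem.Dict.get?_empty] at h
  exact absurd h (by simp)

theorem pvInv_insert (diff : List Int) (pl : Int) (memo : PySem.Dict (Int × Int) Int)
    (hm : pvInv diff pl memo) (a e : Int) (ha : 0 ≤ a) (he : 0 ≤ e) :
    pvInv diff pl (memo.insert (a, e) (pvBest (pvV diff pl) a.toNat e.toNat)) := by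
  intro a' e' r h ha' he'
  rw [PySem.Dict.get?_insert] at h
  by_cases hk : ((a', e') : Int × Int) = (a, e)
  · rw [if_pos hk] at h
    obtain ⟨h1, h2⟩ := Prod.mk.injEq .. ▸ hk
    cases h
    rw [h1, h2]
  · rw [if_neg hk] at h
    exact hm a' e' r h ha' he'

theorem pvBestM_correct (diff : List Int) (pl : Int) (e : Nat) :
    ∀ (a : Int) (memo : PySem.Dict (Int × Int) Int), 0 ≤ a → pvInv diff pl memo →
      (pvBestM diff pl memo a e).1 = pvBest (pvV diff pl) a.toNat e ∧
      pvInv diff pl (pvBestM diff pl memo a e).2 := by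
  induction e with
  | zero =>
    intro a memo ha hm
    exact ⟨rfl, hm⟩
  | succ e ih =>
    intro a memo ha hm
    cases hget : memo.get? (a, (e:Int)+1) with
    | some r =>
      have hred : pvBestM diff pl memo a (e+1) = (r, memo) := by
        simp [pvBestM, hget]
      rw [hred]
      refine ⟨?_, hm⟩
      have := hm a ((e:Int)+1) r hget ha (by omega)
      rw [this, show ((e:Int)+1).toNat = e+1 from by omega]
    | none =>
      have hval : pvVal diff pl a ((e:Int)+1) = pvV diff pl a.toNat (e+1) := by
        simp only [pvV]
        congr 1 <;> omega
      by_cases h0 : a = 0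
      · subst h0
        obtain ⟨ih1, ih2⟩ := ih 0 memo le_rfl hm
        have hred : pvBestM diff pl memo 0 (e+1)
            = ((pvBestM diff pl memo 0 e).1 + pvVal diff pl 0 ((e:Int)+1),
               (pvBestM diff pl memo 0 e).2.insert (0, (e:Int)+1)
                 ((pvBestM diff pl memo 0 e).1 + pvVal diff pl 0 ((e:Int)+1))) := by
          simp [pvBestM, hget]
        have hB : pvBest (pvV diff pl) ((0:Int)).toNat (e+1)
            = (pvBestM diff pl memo 0 e).1 + pvVal diff pl 0 ((e:Int)+1) := by
          rw [ih1, show ((0:Int)).toNat = 0 from rfl, hval, show ((0:Int)).toNat = 0 from rfl]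
          simp [pvBest]
        rw [hred]
        refine ⟨hB.symm, ?_⟩
        have := pvInv_insert diff pl _ ih2 0 ((e:Int)+1) le_rfl (by omega)
        rw [show ((e:Int)+1).toNat = e+1 from by omega, hB] at this
        exact this
      · by_cases hlt : (e:Int)+1 < a
        · have hred : pvBestM diff pl memo a (e+1)
              = (0, memo.insert (a, (e:Int)+1) 0) := by
            simp [pvBestM, hget, h0, hlt]
          have hB : pvBest (pvV diff pl) a.toNat (e+1) = 0 :=
            pvBest_of_lt _ _ _ (by omega)
          rw [hred]
          refine ⟨hB.symm, ?_⟩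
          have := pvInv_insert diff pl memo hm a ((e:Int)+1) ha (by omega)
          rw [show ((e:Int)+1).toNat = e+1 from by omega, hB] at this
          exact this
        · by_cases heq : a = (e:Int)+1
          · obtain ⟨ih1, ih2⟩ := ih (a-1) memo (by omega) hm
            have hred : pvBestM diff pl memo a (e+1)
                = ((pvBestM diff pl memo (a-1) e).1 + pvVal diff pl a ((e:Int)+1),
                   (pvBestM diff pl memo (a-1) e).2.insert (a, (e:Int)+1)
                     ((pvBestM diff pl memo (a-1) e).1 + pvVal diff pl a ((e:Int)+1))) := by
              simp only [pvBestM, hget]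
              rw [if_neg h0, if_neg hlt, if_pos heq]
            have hB : pvBest (pvV diff pl) a.toNat (e+1)
                = (pvBestM diff pl memo (a-1) e).1 + pvVal diff pl a ((e:Int)+1) := by
              rw [ih1, show (a-1).toNat = a.toNat - 1 from by omega, hval]
              simp only [pvBest]
              rw [if_neg (by omega), if_neg (by omega), if_pos (by omega)]
            rw [hred]
            refine ⟨hB.symm, ?_⟩
            have := pvInv_insert diff pl _ ih2 a ((e:Int)+1) ha (by omega)
            rw [show ((e:Int)+1).toNat = e+1 from by omega, hB] at this
            exact this
          · obtain ⟨ih1, ih2⟩ := ih (a-1) memo (by omega) hm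
            obtain ⟨ih3, ih4⟩ := ih a (pvBestM diff pl memo (a-1) e).2 ha ih2
            have hred : pvBestM diff pl memo a (e+1)
                = (max (pvBestM diff pl memo (a-1) e).1
                     (pvBestM diff pl (pvBestM diff pl memo (a-1) e).2 a e).1
                   + pvVal diff pl a ((e:Int)+1),
                   (pvBestM diff pl (pvBestM diff pl memo (a-1) e).2 a e).2.insert (a, (e:Int)+1)
                     (max (pvBestM diff pl memo (a-1) e).1
                        (pvBestM diff pl (pvBestM diff pl memo (a-1) e).2 a e).1
                      + pvVal diff pl a ((e:Int)+1))) := by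
              simp [pvBestM, hget, h0, hlt, heq]
            have hB : pvBest (pvV diff pl) a.toNat (e+1)
                = max (pvBestM diff pl memo (a-1) e).1
                    (pvBestM diff pl (pvBestM diff pl memo (a-1) e).2 a e).1
                  + pvVal diff pl a ((e:Int)+1) := by
              rw [ih1, ih3, show (a-1).toNat = a.toNat - 1 from by omega, hval]
              simp only [pvBest]
              rw [if_neg (by omega), if_neg (by omega), if_neg (by omega)]
            rw [hred]
            refine ⟨hB.symm, ?_⟩
            have := pvInv_insert diff pl _ ih4 a ((e:Int)+1) ha (by omega)
            rw [show ((e:Int)+1).toNat = e+1 from by omega, hB] at this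
            exact this

-- ===== VERDICT (by name: the statement is the Claim_ definition above) =====
theorem compute_min_sum_spec : Claim_equal_compute_min_sum := by
  unfold Claim_equal_compute_min_sum
  intro n k A _ hPre
  unfold Spec_compute_min_sum
  rcases hPre with h0 | ⟨hn, hk, hA⟩ | ⟨hn1, hnA, hk1⟩ | ⟨hn, hk1, hA⟩
  · subst h0
    simp [compute_min_sum, compute_min_sum_alt]
  · subst hk
    simp only [compute_min_sum, compute_min_sum_alt]
    rw [if_neg hn, if_neg hn]
    norm_num
  · have hn0 : n ≠ 0 := by omega
    have hk0 : k ≠ 0 := by omega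
    obtain ⟨K, hK⟩ : ∃ K : Nat, k = (K:Int) := ⟨k.toNat, by omega⟩
    have hmod0 : 0 ≤ PySem.Int.mod n k := PySem.Int.mod_nonneg n (by omega)
    obtain ⟨AO, hAO⟩ : ∃ AO : Nat, PySem.Int.mod n k = (AO:Int) :=
      ⟨(PySem.Int.mod n k).toNat, by omega⟩
    simp only [compute_min_sum, compute_min_sum_alt]
    rw [if_neg hn0, if_neg hk0, if_neg hn0, if_neg hk0]
    rw [pv_diff_eq, hAO, hK]
    rw [show (((AO:Nat):Int)+1).toNat = AO+1 from by omega,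
      show (((K:Nat):Int)+1).toNat = K+1 from by omega,
      show (((K:Nat):Int)).toNat = K from by omega]
    congr 1
    rw [pv_body_A _ _ K AO (by omega)]
    rw [(pvBestM_correct _ _ K ((AO:Nat):Int) PySem.Dict.empty (by omega)
      (pvInv_empty _ _)).1]
    rw [show (((AO:Nat):Int)).toNat = AO from by omega]
  · have hn0 : n ≠ 0 := by omega
    have hk0 : k ≠ 0 := by omega
    have hK : k = ((1:Nat):Int) := by push_cast; omega
    have hd : PySem.List.pyRange 0 (n-1) 1 = [] := PySem.List.pyRange_one_eq_nil (by omega)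
    have hAO : PySem.Int.mod n k = ((0:Nat):Int) := by
      rw [hk1, Nat.cast_zero]
      exact (PySem.Int.mod_eq_zero_iff_dvd n 1).2 (one_dvd n)
    simp only [compute_min_sum, compute_min_sum_alt]
    rw [if_neg hn0, if_neg hk0, if_neg hn0, if_neg hk0]
    rw [hd]
    simp only [List.foldl_nil, List.map_nil]
    rw [hAO, hK]
    rw [show (((0:Nat):Int)+1).toNat = 0+1 from by omega,
      show (((1:Nat):Int)+1).toNat = 1+1 from by omega,
      show (((1:Nat):Int)).toNat = 1 from by omega]
    congr 1
    rw [pv_body_A ([] : List Int) _ 1 0 (by omega)]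
    rw [(pvBestM_correct ([] : List Int) _ 1 ((0:Nat):Int) PySem.Dict.empty (by omega)
      (pvInv_empty _ _)).1]
    rfl
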